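-- pv_equiv track=rewrite | github.com/QuentinN42/CHARPAK-633-Cryptographie-Codes | functions.py | zipMerge
-- ===== SOURCE A (Python) =====
-- def zipMerge(l: list):
--     """
--     >>> zipMegre(["abc", "abc", "a"]) == 'aaabbcc'
--     True
--     """
--     max_len = max(map(len, l))
--     _out = ""
--     for j in range(max_len):
--         for i in range(len(l)):
--             if j < len(l[i]):
--                 _out += l[i][j]
--     return _out
-- ===== SOURCE B (Python) =====
-- def zipMerge(l: list):
--     its = [iter(s) for s in l]
--     out = []
--     while its:
--         alive = []
--         for it in its:
--             c = next(it, None)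
--             if c is not None:
--                 out.append(c)
--                 alive.append(it)
--         its = alive
--     return ''.join(out)
-- ===== Notes on version B (the rewrite author's own statement) =====
-- stated objective: alternative
-- what changed: B replaces A's column-by-column rescan of every string (range(max_len) x range(len(l)) with a length test per cell) by passes over a shrinking list of per-string iterators, touching a string only while it still has characters.
import Mathlib
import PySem

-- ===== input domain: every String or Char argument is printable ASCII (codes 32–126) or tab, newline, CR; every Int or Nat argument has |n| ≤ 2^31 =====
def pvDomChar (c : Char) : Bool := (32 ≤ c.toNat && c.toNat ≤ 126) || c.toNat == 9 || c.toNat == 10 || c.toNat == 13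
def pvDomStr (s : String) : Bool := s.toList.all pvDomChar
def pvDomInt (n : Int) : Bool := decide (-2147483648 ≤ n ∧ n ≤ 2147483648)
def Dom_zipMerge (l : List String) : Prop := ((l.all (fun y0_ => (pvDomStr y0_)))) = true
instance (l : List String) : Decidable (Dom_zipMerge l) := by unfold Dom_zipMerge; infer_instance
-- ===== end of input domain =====

-- B changes the algorithm: instead of re-scanning every string for every column (A),
-- B keeps a shrinking list of per-string iterators and touches each string only while
-- it still has characters (objective: alternative traversal; O(total length + n) passes).

-- ===== PORT A =====
-- A: maxLen = max(map(len, l)); for j in range(maxLen): for i in range(len(l)): if j < len(l[i]): out += l[i][j]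
def zipMerge (l : List String) : String :=
  let maxLen : Int := (PySem.List.max? (l.map (fun s => PySem.Str.len s)) id).getD 0
  let out : List Char :=
    (PySem.List.pyRange 0 maxLen).foldl (fun out j =>
      (PySem.List.pyRange 0 (l.length : Int)).foldl (fun out i =>
        let s := PySem.List.pyGetD l i ""
        if j < PySem.Str.len s then out ++ (PySem.Str.pyGet? s j).toList else out) out) []
  String.mk out

-- ===== PORT B =====
-- one pass of the while loop of Source B: for it in its: c = next(it, None); if some, emit c and keep it
def zmPass : List (List Char) → List Char × List (List Char) → List Char × List (List Char)
  | [], p => p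
  | it :: rest, p =>
      zmPass rest (match it with
        | [] => p
        | c :: t => (p.1 ++ [c], p.2 ++ [t]))

theorem zmPass_eq (its : List (List Char)) (out : List Char) (alive : List (List Char)) :
    zmPass its (out, alive) =
      (out ++ its.filterMap List.head?, alive ++ its.filterMap List.tail?) := by
  induction its generalizing out alive with
  | nil => simp [zmPass]
  | cons it rest ih =>
    cases it with
    | nil => simpa [zmPass] using ih out alive
    | cons c t => simpa [zmPass] using ih (out ++ [c]) (alive ++ [t])

theorem zm_measure (its : List (List Char)) :
    ((its.filterMap List.tail?).map List.length).sum + (its.filterMap List.tail?).length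
      = (its.map List.length).sum := by
  induction its with
  | nil => simp
  | cons it rest ih =>
    cases it with
    | nil => simpa using ih
    | cons c t => simp; omega

-- the while-loop of Source B over the list of live iterators
def zmLoop (its : List (List Char)) (out : List Char) : List Char :=
  if _h : its = [] then out
  else
    let p := zmPass its (out, [])
    zmLoop p.2 p.1
termination_by (its.map List.length).sum + its.length
decreasing_by
  simp only [zmPass_eq, List.nil_append]
  have := zm_measure its
  have : its.length ≥ 1 := List.length_pos_iff.mpr _h
  omega

def zipMerge_alt (l : List String) : String :=
  String.mk (zmLoop (l.map String.toList) [])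

-- ===== PRECONDITION & SPEC =====
-- Pre_ excludes only the empty list, on which A's max() raises ValueError.
def Pre_zipMerge (l : List String) : Prop := l ≠ []
instance (l : List String) : Decidable (Pre_zipMerge l) := by unfold Pre_zipMerge; infer_instance
def pvWitness_zipMerge : List String := ["abc", "abc", "a"]

def Spec_zipMerge (l : List String) (out : String) : Prop := out = zipMerge_alt l
instance (l : List String) (out : String) : Decidable (Spec_zipMerge l out) := by unfold Spec_zipMerge; infer_instance

-- ===== CLAIM (what is proved, stated in full; the proofs are below) =====
def Claim_equal_zipMerge : Prop := ∀ (l : List String), Dom_zipMerge l → Pre_zipMerge l → Spec_zipMerge l (zipMerge l)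

-- ===== LEMMAS AND PROOFS =====

-- column j of a list of char lists
def zmCol (its : List (List Char)) (j : Nat) : List Char := its.filterMap (fun s => s[j]?)

def zmF (n : Nat) (its : List (List Char)) : List Char :=
  ((List.range n).map (zmCol its)).flatten

theorem zmCol_tails (its : List (List Char)) (j : Nat) :
    zmCol (its.filterMap List.tail?) j = zmCol its (j + 1) := by
  unfold zmCol
  rw [List.filterMap_filterMap]
  apply List.filterMap_congr
  intro s _
  cases s <;> simp

theorem zmLoop_eq_F (n : Nat) (its : List (List Char)) (out : List Char)
    (hb : ∀ s ∈ its, s.length ≤ n) :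
    zmLoop its out = out ++ zmF n its := by
  induction n generalizing its out with
  | zero =>
    have hall : ∀ s ∈ its, s = [] := by
      intro s hs; have := hb s hs; simpa [List.length_eq_zero_iff] using this
    cases h : its with
    | nil => rw [zmLoop]; simp [zmF]
    | cons a rest =>
      subst h
      rw [zmLoop, dif_neg (List.cons_ne_nil a rest)]
      simp only [zmPass_eq, List.nil_append]
      have h1 : (a :: rest).filterMap List.head? = [] := by
        rw [List.filterMap_eq_nil_iff]; intro s hs; rw [hall s hs]; rfl
      have h2 : (a :: rest).filterMap List.tail? = [] := by
        rw [List.filterMap_eq_nil_iff]; intro s hs; rw [hall s hs]; rfl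
      rw [h1, h2, zmLoop]
      simp [zmF]
  | succ n ih =>
    cases h : its with
    | nil => rw [zmLoop]; simp [zmF, zmCol]
    | cons a rest =>
      subst h
      rw [zmLoop, dif_neg (List.cons_ne_nil a rest)]
      simp only [zmPass_eq, List.nil_append]
      rw [ih _ _ (by
        intro s hs
        rcases List.mem_filterMap.mp hs with ⟨t, ht, hts⟩
        cases t with
        | nil => simp at hts
        | cons c u =>
          simp at hts
          have := hb _ ht
          simp [← hts] at this ⊢
          omega)]
      rw [List.append_assoc]
      congr 1
      -- heads ++ F n (tails) = F (n+1) its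
      have hhead : (a :: rest).filterMap List.head? = zmCol (a :: rest) 0 := by
        unfold zmCol
        apply List.filterMap_congr
        intro s _
        cases s <;> simp
      unfold zmF
      rw [List.range_succ_eq_map, List.map_cons, List.flatten_cons, hhead]
      congr 1
      apply congrArg
      rw [List.map_map]
      apply List.map_congr_left
      intro j _
      simpa [Nat.succ_eq_add_one] using zmCol_tails (a :: rest) j

-- A's inner loop over i produces column j
theorem zm_map_getD_range {α : Type} (xs : List α) (d : α) :
    (List.range xs.length).map (fun k => xs.getD k d) = xs := by
  apply List.ext_getElem
  · simp
  · intro i h1 h2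
    simp [List.getD_eq_getElem?_getD, List.getElem?_eq_getElem h2]

-- A's inner loop over i produces column j
theorem zipMergeA_inner (l : List String) (j : Nat) (out : List Char) :
    (PySem.List.pyRange 0 (l.length : Int)).foldl (fun out i =>
        let s := PySem.List.pyGetD l i ""
        if (j : Int) < PySem.Str.len s then out ++ (PySem.Str.pyGet? s j).toList else out) out
      = out ++ zmCol (l.map String.toList) j := by
  rw [PySem.List.pyRange_zero_natCast, List.foldl_map]
  rw [PySem.List.foldl_congr_mem _ _ (fun out k => out ++ (((l.getD k "").toList[j]?).toList)) out ?_]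
  · rw [PySem.List.foldl_append_eq_flatMap]
    congr 1
    have hmm : (List.range l.length).map (fun k => (((l.getD k "").toList[j]?).toList : List Char))
        = ((List.range l.length).map (fun k => l.getD k "")).map
            (fun s => ((s.toList[j]?).toList : List Char)) := by rw [List.map_map]; rfl
    rw [List.flatMap_def, hmm, zm_map_getD_range]
    unfold zmCol
    rw [List.filterMap_map, List.filterMap_eq_flatMap_toList, List.flatMap_def]
    simp [Function.comp]
  · intro acc k hk
    simp only [PySem.List.pyGetD_natCast, PySem.Str.pyGet?_natCast, PySem.Str.len_eq]
    split_ifs with hlt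
    · rfl
    · have hnone : (l.getD k "").toList[j]? = none := by
        apply List.getElem?_eq_none
        omega
      rw [hnone]
      simp

theorem zm_foldl_max_some {α κ : Type} [LT κ] [DecidableLT κ] (key : α → κ) :
    ∀ (xs : List α) (m : α), ∃ z, xs.foldl
      (fun acc x => match acc with
        | none => some x
        | some m => if key m < key x then some x else some m) (some m) = some z := by
  intro xs
  induction xs with
  | nil => exact fun m => ⟨m, rfl⟩
  | cons y ys ih =>
    intro m
    simp only [List.foldl_cons]
    split_ifs <;> exact ih _

theorem zm_outer (l : List String) :
    ∀ (n : Nat) (out : List Char),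
      (PySem.List.pyRange 0 (n : Int)).foldl (fun out j =>
        (PySem.List.pyRange 0 (l.length : Int)).foldl (fun out i =>
          let s := PySem.List.pyGetD l i ""
          if j < PySem.Str.len s then out ++ (PySem.Str.pyGet? s j).toList else out) out) out
      = out ++ zmF n (l.map String.toList) := by
  intro n
  induction n with
  | zero =>
    intro out
    simp [PySem.List.pyRange, zmF]
  | succ n ih =>
    intro out
    have hcast : ((n + 1 : Nat) : Int) = (n : Int) + 1 := by push_cast; ring
    rw [hcast, PySem.List.pyRange_one_succ_right (by positivity), List.foldl_append, ih,
      List.foldl_cons, List.foldl_nil, zipMergeA_inner]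
    unfold zmF
    rw [List.range_succ, List.map_append, List.flatten_append]
    simp

theorem zipMerge_eq_F (l : List String) (hl : l ≠ []) :
    ∃ M : Nat, (∀ s ∈ l.map String.toList, s.length ≤ M) ∧
      zipMerge l = String.mk (zmF M (l.map String.toList)) := by
  unfold zipMerge
  obtain ⟨m, hm⟩ : ∃ m, PySem.List.max? (l.map (fun s => PySem.Str.len s)) id = some m := by
    cases l with
    | nil => exact absurd rfl hl
    | cons a rest =>
      unfold PySem.List.max?
      rw [List.map_cons, List.foldl_cons]
      exact zm_foldl_max_some id _ _
  have hmem : m ∈ l.map (fun s => PySem.Str.len s) := PySem.List.max?_mem hm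
  have hm0 : 0 ≤ m := by
    obtain ⟨s0, _, hs0m⟩ := List.mem_map.mp hmem
    rw [← hs0m, PySem.Str.len_eq]
    positivity
  obtain ⟨M, rfl⟩ : ∃ M : Nat, m = (M : Int) := ⟨m.toNat, by omega⟩
  refine ⟨M, ?_, ?_⟩
  · intro s hs
    rcases List.mem_map.mp hs with ⟨t, ht, rfl⟩
    have := PySem.List.max?_isMax hm (PySem.Str.len t) (List.mem_map_of_mem ht)
    rw [PySem.Str.len_eq] at this
    simp only [id] at this
    exact_mod_cast this
  · rw [hm]
    simp only [Option.getD_some]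
    rw [zm_outer l M []]
    simp

-- ===== VERDICT (by name: the statement is the Claim_ definition above) =====
theorem zipMerge_spec : Claim_equal_zipMerge := by
  intro l _ hpre
  unfold Spec_zipMerge zipMerge_alt
  obtain ⟨M, hb, hA⟩ := zipMerge_eq_F l hpre
  rw [hA, zmLoop_eq_F M _ [] hb]
  simp
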